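-- pv_equiv track=rewrite | github.com/BenjyNStrauss/SwiPred9_Snapshot | src-py/proteinBERT/swipred_dataset.py | to4ClassSS
-- ===== SOURCE A (Python) =====
-- def to4ClassSS(line):
--     tokens = line.split(", ")
--     newLine = "".join(token[1] for token in tokens)
--     newLine = newLine.replace("5", "E")
--     newLine = newLine.replace("9", "C")
--     newLine = newLine.replace("6", "E")
--     newLine = newLine.replace("2", "H")
--     newLine = newLine.replace("1", "H")
--     newLine = newLine.replace("3", "H")
--     newLine = newLine.replace("4", "H")
--     newLine = newLine.replace("7", "C")
--     newLine = newLine.replace("8", "C")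
--     newLine = newLine.replace("0", "D")
--     return newLine
-- ===== SOURCE B (Python) =====
-- def to4ClassSS(line):
--     def classify(c):
--         if "1" <= c <= "4":
--             return "H"
--         if "5" <= c <= "6":
--             return "E"
--         if "7" <= c <= "9":
--             return "C"
--         if c == "0":
--             return "D"
--         return c
--     out = []
--     rest = line
--     while True:
--         j = rest.find(", ")
--         token = rest if j < 0 else rest[:j]
--         out.append(classify(token[1]))
--         if j < 0:
--             return "".join(out)
--         rest = rest[j + 2:]
-- ===== Notes on version B (the rewrite author's own statement) =====
-- stated objective: alternative
-- what changed: B drops split() and the ten sequential full-string replace passes: it scans the line itself with a find(', ') loop, slicing one token at a time, and classifies each token's second character by code-point range comparisons ('1'<=c<='4' -> H, '5'<=c<='6' -> E, '7'<=c<='9' -> C, '0' -> D, else pass-through) while accumulating the output in one pass.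
import Mathlib
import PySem

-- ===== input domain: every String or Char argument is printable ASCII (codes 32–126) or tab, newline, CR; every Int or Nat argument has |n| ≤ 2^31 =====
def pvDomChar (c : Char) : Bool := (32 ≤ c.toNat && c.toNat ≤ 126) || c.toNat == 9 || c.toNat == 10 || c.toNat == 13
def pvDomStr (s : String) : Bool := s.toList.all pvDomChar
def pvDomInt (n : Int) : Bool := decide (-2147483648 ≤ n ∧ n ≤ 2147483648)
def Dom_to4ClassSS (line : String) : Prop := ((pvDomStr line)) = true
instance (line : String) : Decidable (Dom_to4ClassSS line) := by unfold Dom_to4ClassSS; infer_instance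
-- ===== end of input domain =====

-- B replaces A's split + ten sequential full-string replace passes by a single find(", ")
-- scanner over the line, classifying each token's second char by code-point range tests.


-- ===== PORT A =====
-- Transliteration of A: split on ", ", take token[1] of each token ("".join of the
-- single characters is the list of those characters), then ten sequential replace passes.
def to4ClassSS (line : String) : String :=
  let tokens := PySem.Chars.splitOn line.toList (", ".toList)
  let newLine := tokens.map (fun token => PySem.List.pyGetD token 1 ' ')
  let newLine := PySem.Chars.replace newLine ['5'] ['E']
  let newLine := PySem.Chars.replace newLine ['9'] ['C']
  let newLine := PySem.Chars.replace newLine ['6'] ['E']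
  let newLine := PySem.Chars.replace newLine ['2'] ['H']
  let newLine := PySem.Chars.replace newLine ['1'] ['H']
  let newLine := PySem.Chars.replace newLine ['3'] ['H']
  let newLine := PySem.Chars.replace newLine ['4'] ['H']
  let newLine := PySem.Chars.replace newLine ['7'] ['C']
  let newLine := PySem.Chars.replace newLine ['8'] ['C']
  let newLine := PySem.Chars.replace newLine ['0'] ['D']
  String.ofList newLine

-- ===== PORT B =====
-- B's classify: code-point range tests instead of any table or replace pass.
def classifyB (c : Char) : Char :=
  if '1' ≤ c ∧ c ≤ '4' then 'H'
  else if '5' ≤ c ∧ c ≤ '6' then 'E'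
  else if '7' ≤ c ∧ c ≤ '9' then 'C'
  else if c = '0' then 'D'
  else c

-- B's while loop: rest.find(", "); token = rest (last round) or rest[:j]; emit
-- classify(token[1]); continue on rest[j+2:].  Fuel = len(line)+1 bounds the iterations
-- (each round past the first drops at least 2 characters).
def altGo (fuel : Nat) (rest : List Char) : List Char :=
  match fuel with
  | 0 => []
  | fuel + 1 =>
    let j := PySem.Chars.find rest [',', ' ']
    let token := if j < 0 then rest else rest.take j.toNat
    let c := classifyB (PySem.List.pyGetD token 1 ' ')
    if j < 0 then [c] else c :: altGo fuel (rest.drop (j.toNat + 2))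

def to4ClassSS_alt (line : String) : String :=
  String.ofList (altGo (line.toList.length + 1) line.toList)

-- ===== PRECONDITION & SPEC =====
-- Pre_ excludes exactly the inputs where A raises IndexError (token[1] on a token of
-- length < 2 produced by the split); B raises identically there.
def Pre_to4ClassSS (line : String) : Prop :=
  ∀ token ∈ PySem.Chars.splitOn line.toList (", ".toList), 2 ≤ token.length
instance (line : String) : Decidable (Pre_to4ClassSS line) := by unfold Pre_to4ClassSS; infer_instance
def pvWitness_to4ClassSS : String := "a5, b0, x9"

def Spec_to4ClassSS (line : String) (out : String) : Prop := out = to4ClassSS_alt line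
instance (line : String) (out : String) : Decidable (Spec_to4ClassSS line out) := by unfold Spec_to4ClassSS; infer_instance

-- ===== CLAIM (what is proved, stated in full; the proofs are below) =====
def Claim_equal_to4ClassSS : Prop := ∀ (line : String), Dom_to4ClassSS line → Pre_to4ClassSS line → Spec_to4ClassSS line (to4ClassSS line)

-- ===== LEMMAS AND PROOFS =====

-- single-character substitution, the effect of one replace pass
def sub (a b c : Char) : Char := if c = a then b else c

theorem go_single (a b : Char) : ∀ (fuel : Nat) (l acc : List Char), l.length ≤ fuel →
    PySem.Chars.replace.go [a] [b] fuel l acc = acc.reverse ++ l.map (sub a b) := by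
  intro fuel
  induction fuel with
  | zero => intro l acc h; simp at h; simp [h, PySem.Chars.replace.go]
  | succ n ih =>
    intro l acc h
    cases l with
    | nil => simp [PySem.Chars.replace.go]
    | cons c t =>
      simp only [PySem.Chars.replace.go]
      by_cases hc : c = a
      · simp [sub, hc, List.isPrefixOf, ih t _ (by simpa using h)]
      · simp [sub, List.isPrefixOf, hc, ih t _ (by simpa using h)]
        intro h; exact absurd h.symm hc

-- one replace pass with a single-character pattern is a map of that substitution
theorem replace_single (cs : List Char) (a b : Char) :
    PySem.Chars.replace cs [a] [b] = cs.map (sub a b) := by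
  simp [PySem.Chars.replace, go_single a b cs.length cs [] le_rfl]

-- Char equality from code points
theorem char_eq_of_toNat (c d : Char) (h : c.toNat = d.toNat) : c = d :=
  Char.ext (UInt32.toNat_inj.mp h)

-- a char that is no digit classifies to itself
theorem classifyB_id (c : Char) (h0 : c ≠ '0') (h1 : c ≠ '1') (h2 : c ≠ '2') (h3 : c ≠ '3')
    (h4 : c ≠ '4') (h5 : c ≠ '5') (h6 : c ≠ '6') (h7 : c ≠ '7') (h8 : c ≠ '8')
    (h9 : c ≠ '9') : classifyB c = c := by
  have k1 : c.toNat ≠ 49 := fun h => h1 (char_eq_of_toNat c '1' (by rw [h]; rfl))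
  have k2 : c.toNat ≠ 50 := fun h => h2 (char_eq_of_toNat c '2' (by rw [h]; rfl))
  have k3 : c.toNat ≠ 51 := fun h => h3 (char_eq_of_toNat c '3' (by rw [h]; rfl))
  have k4 : c.toNat ≠ 52 := fun h => h4 (char_eq_of_toNat c '4' (by rw [h]; rfl))
  have k5 : c.toNat ≠ 53 := fun h => h5 (char_eq_of_toNat c '5' (by rw [h]; rfl))
  have k6 : c.toNat ≠ 54 := fun h => h6 (char_eq_of_toNat c '6' (by rw [h]; rfl))
  have k7 : c.toNat ≠ 55 := fun h => h7 (char_eq_of_toNat c '7' (by rw [h]; rfl))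
  have k8 : c.toNat ≠ 56 := fun h => h8 (char_eq_of_toNat c '8' (by rw [h]; rfl))
  have k9 : c.toNat ≠ 57 := fun h => h9 (char_eq_of_toNat c '9' (by rw [h]; rfl))
  have hx : ¬('1' ≤ c ∧ c ≤ '4') := fun p => by
    have p1 : (49:Nat) ≤ c.toNat := p.1
    have p2 : c.toNat ≤ (52:Nat) := p.2
    omega
  have hy : ¬('5' ≤ c ∧ c ≤ '6') := fun p => by
    have p1 : (53:Nat) ≤ c.toNat := p.1
    have p2 : c.toNat ≤ (54:Nat) := p.2
    omega
  have hz : ¬('7' ≤ c ∧ c ≤ '9') := fun p => by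
    have p1 : (55:Nat) ≤ c.toNat := p.1
    have p2 : c.toNat ≤ (57:Nat) := p.2
    omega
  unfold classifyB
  split_ifs
  rfl

-- pointwise: the ten composed substitutions agree with B's range classification
theorem subAll_eq_classifyB (c : Char) :
    sub '0' 'D' (sub '8' 'C' (sub '7' 'C' (sub '4' 'H' (sub '3' 'H' (sub '1' 'H'
      (sub '2' 'H' (sub '6' 'E' (sub '9' 'C' (sub '5' 'E' c))))))))) = classifyB c := by
  by_cases h5 : c = '5'; · subst h5; rfl
  by_cases h9 : c = '9'; · subst h9; rfl
  by_cases h6 : c = '6'; · subst h6; rfl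
  by_cases h2 : c = '2'; · subst h2; rfl
  by_cases h1 : c = '1'; · subst h1; rfl
  by_cases h3 : c = '3'; · subst h3; rfl
  by_cases h4 : c = '4'; · subst h4; rfl
  by_cases h7 : c = '7'; · subst h7; rfl
  by_cases h8 : c = '8'; · subst h8; rfl
  by_cases h0 : c = '0'; · subst h0; rfl
  simp only [sub, if_neg h5, if_neg h9, if_neg h6, if_neg h2, if_neg h1, if_neg h3,
             if_neg h4, if_neg h7, if_neg h8, if_neg h0]
  exact (classifyB_id c h0 h1 h2 h3 h4 h5 h6 h7 h8 h9).symm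

-- the splitOn worker ignores fuel once it covers the remaining input
theorem go_fuel (sep : List Char) (hsep : sep ≠ []) : ∀ (f1 f2 : Nat) (l cur : List Char)
    (acc : List (List Char)), l.length ≤ f1 → l.length ≤ f2 →
    PySem.Chars.splitOn.go sep f1 l cur acc = PySem.Chars.splitOn.go sep f2 l cur acc := by
  intro f1
  induction f1 with
  | zero =>
    intro f2 l cur acc hl _
    have : l = [] := List.eq_nil_of_length_eq_zero (Nat.le_zero.mp hl)
    subst this
    cases f2 with
    | zero => rfl
    | succ m =>
      show ((cur.reverse ++ []) :: acc).reverse = (cur.reverse :: acc).reverse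
      simp
  | succ n ih =>
    intro f2 l cur acc hl hl2
    cases l with
    | nil =>
      cases f2 with
      | zero =>
        show (cur.reverse :: acc).reverse = ((cur.reverse ++ []) :: acc).reverse
        simp
      | succ m => rfl
    | cons c rest =>
      cases f2 with
      | zero => simp at hl2
      | succ m =>
        show (if sep.isPrefixOf (c :: rest) then _ else _) = (if sep.isPrefixOf (c :: rest) then _ else _)
        by_cases hp : sep.isPrefixOf (c :: rest)
        · rw [if_pos hp, if_pos hp]
          have h1 : 1 ≤ sep.length := by
            cases sep with
            | nil => exact absurd rfl hsep
            | cons _ _ => simp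
          exact ih m _ [] _ (by simp at hl ⊢; omega) (by simp at hl2 ⊢; omega)
        · rw [if_neg hp, if_neg hp]
          exact ih m rest (c :: cur) acc (by simpa using hl) (by simpa using hl2)

-- the accumulator is a prefix of the result
theorem go_acc (sep : List Char) : ∀ (fuel : Nat) (l cur : List Char) (acc : List (List Char)),
    PySem.Chars.splitOn.go sep fuel l cur acc = acc.reverse ++ PySem.Chars.splitOn.go sep fuel l cur [] := by
  intro fuel
  induction fuel with
  | zero => intro l cur acc; simp [PySem.Chars.splitOn.go]
  | succ n ih =>
    intro l cur acc
    cases l with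
    | nil => show (cur.reverse :: acc).reverse = acc.reverse ++ (cur.reverse :: []).reverse; simp
    | cons c rest =>
      show (if sep.isPrefixOf (c :: rest) then _ else _) = acc.reverse ++ (if sep.isPrefixOf (c :: rest) then _ else _)
      by_cases hp : sep.isPrefixOf (c :: rest)
      · rw [if_pos hp, if_pos hp, ih _ [] (cur.reverse :: acc), ih _ [] (cur.reverse :: [])]
        simp
      · rw [if_neg hp, if_neg hp, ih rest (c :: cur) acc]

-- no occurrence of sep: the scan finishes the current token
theorem go_no_occ (sep : List Char) : ∀ (fuel : Nat) (l cur : List Char) (acc : List (List Char)),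
    l.length ≤ fuel → ¬ sep <:+: l →
    PySem.Chars.splitOn.go sep fuel l cur acc = ((cur.reverse ++ l) :: acc).reverse := by
  intro fuel
  induction fuel with
  | zero =>
    intro l cur acc hl _
    have : l = [] := List.eq_nil_of_length_eq_zero (Nat.le_zero.mp hl)
    subst this; rfl
  | succ n ih =>
    intro l cur acc hl hocc
    cases l with
    | nil => show (cur.reverse :: acc).reverse = _; simp
    | cons c rest =>
      have hp : ¬ sep.isPrefixOf (c :: rest) := by
        intro h
        exact hocc (List.IsPrefix.isInfix (List.isPrefixOf_iff_prefix.mp h))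
      show (if sep.isPrefixOf (c :: rest) then _ else _) = _
      rw [if_neg hp, ih rest (c :: cur) acc (by simpa using hl)
            (fun h => hocc (h.trans (List.suffix_cons c rest).isInfix))]
      simp

-- first occurrence of ", " at j: the scan closes the token l.take j and restarts after it
theorem go_occ : ∀ (j fuel : Nat) (l cur : List Char) (acc : List (List Char)),
    l.length ≤ fuel → [',', ' '] <+: l.drop j → (∀ i < j, ¬ [',', ' '] <+: l.drop i) →
    PySem.Chars.splitOn.go [',', ' '] fuel l cur acc =
      PySem.Chars.splitOn.go [',', ' '] ((l.drop (j + 2)).length + 1) (l.drop (j + 2)) []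
        ((cur.reverse ++ l.take j) :: acc) := by
  intro j
  induction j with
  | zero =>
    intro fuel l cur acc hl hpre _
    simp only [List.drop_zero] at hpre
    have hlen : 2 ≤ l.length := by
      have := hpre.length_le; simpa using this
    cases l with
    | nil => simp at hlen
    | cons c rest =>
      cases fuel with
      | zero => exact absurd hl (by simp)
      | succ n =>
        have hp : ([',', ' '] : List Char).isPrefixOf (c :: rest) := List.isPrefixOf_iff_prefix.mpr hpre
        show (if _ then _ else _) = _
        rw [if_pos hp]
        have h2 : (List.drop ([',', ' '] : List Char).length (c :: rest)) = (c :: rest).drop (0 + 2) := rfl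
        rw [h2]
        have e1 : cur.reverse ++ List.take 0 (c :: rest) = cur.reverse := by simp
        rw [e1]
        exact go_fuel [',', ' '] (by simp) n ((List.drop (0 + 2) (c :: rest)).length + 1)
          (List.drop (0 + 2) (c :: rest)) [] (cur.reverse :: acc)
          (by simp at hl ⊢; omega) (by omega)
  | succ j ih =>
    intro fuel l cur acc hl hpre hmin
    cases l with
    | nil => exact absurd hpre.length_le (by simp)
    | cons c rest =>
      cases fuel with
      | zero => exact absurd hl (by simp)
      | succ n =>
        have hp : ¬ ([',', ' '] : List Char).isPrefixOf (c :: rest) := by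
          intro h
          exact hmin 0 (Nat.succ_pos j) (by simpa using List.isPrefixOf_iff_prefix.mp h)
        show (if _ then _ else _) = _
        rw [if_neg hp]
        have hpre' : [',', ' '] <+: rest.drop j := by simpa using hpre
        have hmin' : ∀ i < j, ¬ [',', ' '] <+: rest.drop i := by
          intro i hi h
          exact hmin (i + 1) (by omega) (by simpa using h)
        rw [ih n rest (c :: cur) acc (by simpa using hl) hpre' hmin']
        simp

-- splitOn on ", " seen through find: the unfolding B's loop takes
theorem splitOn_eq_find (l : List Char) :
    PySem.Chars.splitOn l [',', ' '] =
      (if PySem.Chars.find l [',', ' '] < 0 then [l]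
       else l.take (PySem.Chars.find l [',', ' ']).toNat ::
            PySem.Chars.splitOn (l.drop ((PySem.Chars.find l [',', ' ']).toNat + 2)) [',', ' ']) := by
  by_cases hf : PySem.Chars.find l [',', ' '] < 0
  · rw [if_pos hf]
    have hm1 : PySem.Chars.find l [',', ' '] = -1 := by
      have := PySem.Chars.neg_one_le_find l [',', ' ']
      omega
    have hno : ¬ [',', ' '] <:+: l := (PySem.Chars.find_eq_neg_one_iff l [',', ' ']).mp hm1
    show PySem.Chars.splitOn.go [',', ' '] (l.length + 1) l [] [] = [l]
    rw [go_no_occ [',', ' '] (l.length + 1) l [] [] (by omega) hno]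
    simp
  · rw [if_neg hf]
    have h0 : 0 ≤ PySem.Chars.find l [',', ' '] := by omega
    obtain ⟨hpre, hmin⟩ := PySem.Chars.find_spec (s := l) (sub := [',', ' ']) h0
    show PySem.Chars.splitOn.go [',', ' '] (l.length + 1) l [] [] = _
    rw [go_occ (PySem.Chars.find l [',', ' ']).toNat (l.length + 1) l [] [] (by omega) hpre hmin,
        go_acc]
    rfl

-- B's loop is the classified map over A's split
theorem altGo_eq : ∀ (fuel : Nat) (rest : List Char), rest.length < fuel →
    altGo fuel rest = (PySem.Chars.splitOn rest [',', ' ']).map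
      (fun t => classifyB (PySem.List.pyGetD t 1 ' ')) := by
  intro fuel
  induction fuel with
  | zero => intro rest h; omega
  | succ n ih =>
    intro rest h
    rw [splitOn_eq_find rest]
    simp only [altGo]
    by_cases hf : PySem.Chars.find rest [',', ' '] < 0
    · simp only [if_pos hf, List.map_cons, List.map_nil]
    · simp only [if_neg hf, List.map_cons]
      have h0 : 0 ≤ PySem.Chars.find rest [',', ' '] := by omega
      have hinf : [',', ' '] <:+: rest :=
        (PySem.Chars.find_nonneg_iff rest [',', ' ']).mp h0
      have h2 : 2 ≤ rest.length := by
        have := hinf.length_le; simpa using this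
      rw [ih _ (by simp [List.length_drop]; omega)]

-- ===== VERDICT (by name: the statement is the Claim_ definition above) =====
theorem to4ClassSS_spec : Claim_equal_to4ClassSS := by
  intro line _ _
  show to4ClassSS line = to4ClassSS_alt line
  unfold to4ClassSS to4ClassSS_alt
  have hsep : (", ".toList) = [',', ' '] := by decide
  rw [hsep, altGo_eq _ _ (Nat.lt_succ_self _)]
  simp only [replace_single, List.map_map]
  refine congrArg String.ofList (List.map_congr_left fun token _ => ?_)
  simp only [Function.comp_apply]
  exact subAll_eq_classifyB (PySem.List.pyGetD token 1 ' ')
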